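-- pv_equiv track=rewrite | github.com/MarcelDev-u/python_course | zajecia_8.py | znajdz_rozwiazania
-- ===== SOURCE A (Python) =====
-- def znajdz_rozwiazania(limit=100, przesuniecie=150):
--     """Szuka trojek (a, b, c) spelniajacych a+b+c = a*b*c - przesuniecie."""
--     rozwiazania = []
--     for a in range(1, limit + 1):
--         for b in range(1, limit + 1):
--             for c in range(1, limit + 1):
--                 if a + b + c == a * b * c - przesuniecie:
--                     rozwiazania.append((a, b, c))
--     return rozwiazania
-- ===== SOURCE B (Python) =====
-- def znajdz_rozwiazania(limit=100, przesuniecie=150):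
--     """Szuka trojek (a, b, c) spelniajacych a+b+c = a*b*c - przesuniecie."""
--     def kandydaci(a, b):
--         d = a * b - 1
--         if d == 0:
--             # a = b = 1: equation reduces to przesuniecie == -2, any c works
--             return [(a, b, c) for c in range(1, limit + 1)] if przesuniecie == -2 else []
--         s = a + b + przesuniecie
--         if s % d != 0:
--             return []
--         c = s // d
--         return [(a, b, c)] if 1 <= c <= limit else []
--     return [t for a in range(1, limit + 1)
--               for b in range(1, limit + 1)
--               for t in kandydaci(a, b)]
-- ===== Notes on version B (the rewrite author's own statement) =====
-- stated objective: faster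
-- what changed: Instead of brute-forcing all (a,b,c) triples with three nested loops and an accumulator, B solves the equation for c per (a,b) pair via a helper returning the candidate list (c = (a+b+przesuniecie)/(a*b-1) with integrality/range check, plus the degenerate a=b=1 case), flattened by a comprehension.
import Mathlib
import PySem

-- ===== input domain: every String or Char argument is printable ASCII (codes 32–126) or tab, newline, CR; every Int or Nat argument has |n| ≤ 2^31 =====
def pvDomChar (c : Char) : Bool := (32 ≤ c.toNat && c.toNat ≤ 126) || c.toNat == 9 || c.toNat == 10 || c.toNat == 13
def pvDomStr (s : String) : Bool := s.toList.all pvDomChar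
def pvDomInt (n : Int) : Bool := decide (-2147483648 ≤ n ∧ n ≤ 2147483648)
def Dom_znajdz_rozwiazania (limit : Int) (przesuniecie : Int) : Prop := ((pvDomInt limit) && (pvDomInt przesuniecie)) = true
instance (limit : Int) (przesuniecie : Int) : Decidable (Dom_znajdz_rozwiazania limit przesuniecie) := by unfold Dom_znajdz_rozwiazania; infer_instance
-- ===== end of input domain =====

-- B solves the equation for c per (a,b) pair (O(limit^2)) via a per-pair candidate helper flattened by flatMap, instead of A's three nested accumulator loops over all triples (O(limit^3)).


-- ===== PORT A =====
def znajdz_rozwiazania (limit : Int) (przesuniecie : Int) : List (Int × Int × Int) :=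
  (PySem.List.pyRange 1 (limit + 1) 1).foldl (fun acc a =>
    (PySem.List.pyRange 1 (limit + 1) 1).foldl (fun acc b =>
      (PySem.List.pyRange 1 (limit + 1) 1).foldl (fun acc c =>
        if a + b + c = a * b * c - przesuniecie then acc ++ [(a, b, c)] else acc) acc) acc) []

-- ===== PORT B =====
-- helper `kandydaci` of Source B: the candidate solutions for one (a, b) pair
def pvKandydaci (limit przesuniecie a b : Int) : List (Int × Int × Int) :=
  let d := a * b - 1
  if d = 0 then
    if przesuniecie = -2 then (PySem.List.pyRange 1 (limit + 1) 1).map (fun c => (a, b, c)) else []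
  else
    let s := a + b + przesuniecie
    if PySem.Int.mod s d ≠ 0 then []
    else
      let c := PySem.Int.floordiv s d
      if 1 ≤ c ∧ c ≤ limit then [(a, b, c)] else []

def znajdz_rozwiazania_alt (limit : Int) (przesuniecie : Int) : List (Int × Int × Int) :=
  (PySem.List.pyRange 1 (limit + 1) 1).flatMap (fun a =>
    (PySem.List.pyRange 1 (limit + 1) 1).flatMap (fun b => pvKandydaci limit przesuniecie a b))

-- ===== PRECONDITION & SPEC =====
def Spec_znajdz_rozwiazania (limit : Int) (przesuniecie : Int) (out : List (Int × Int × Int)) : Prop := out = znajdz_rozwiazania_alt limit przesuniecie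
instance (limit : Int) (przesuniecie : Int) (out : List (Int × Int × Int)) : Decidable (Spec_znajdz_rozwiazania limit przesuniecie out) := by unfold Spec_znajdz_rozwiazania; infer_instance

-- ===== CLAIM (what is proved, stated in full; the proofs are below) =====
def Claim_equal_znajdz_rozwiazania : Prop := ∀ (limit : Int) (przesuniecie : Int), Dom_znajdz_rozwiazania limit przesuniecie → Spec_znajdz_rozwiazania limit przesuniecie (znajdz_rozwiazania limit przesuniecie)

-- ===== LEMMAS AND PROOFS =====

-- A's per-(a,b) block: the c-values kept by the innermost loop
def pvBlockA (limit przesuniecie a b : Int) : List (Int × Int × Int) :=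
  ((PySem.List.pyRange 1 (limit + 1) 1).filter
      (fun c => decide (a + b + c = a * b * c - przesuniecie))).map (fun c => (a, b, c))

lemma flatten_A (limit przesuniecie : Int) :
    znajdz_rozwiazania limit przesuniecie =
      (PySem.List.pyRange 1 (limit + 1) 1).flatMap (fun a =>
        (PySem.List.pyRange 1 (limit + 1) 1).flatMap (fun b => pvBlockA limit przesuniecie a b)) := by
  unfold znajdz_rozwiazania pvBlockA
  simp only [PySem.List.foldl_append_ite, PySem.List.foldl_append_eq_flatMap, List.nil_append]

-- filter with a predicate pinned to one value, on a Nodup list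
lemma filter_eq_single {l : List Int} (h : l.Nodup) (c0 : Int) :
    l.filter (fun c => decide (c = c0)) = if c0 ∈ l then [c0] else [] := by
  induction l with
  | nil => simp
  | cons x xs ih =>
    rcases List.nodup_cons.mp h with ⟨hx, hxs⟩
    by_cases hxc : x = c0
    · subst hxc
      simp [ih hxs, hx]
    · simp [hxc, ih hxs, Ne.symm hxc]

lemma block_eq (limit przesuniecie a b : Int) (ha : 1 ≤ a) (hb : 1 ≤ b) :
    pvBlockA limit przesuniecie a b = pvKandydaci limit przesuniecie a b := by
  unfold pvBlockA pvKandydaci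
  by_cases hd : a * b - 1 = 0
  · -- a = b = 1
    have hab : a = 1 ∧ b = 1 := by
      constructor <;> nlinarith
    obtain ⟨ha1, hb1⟩ := hab; subst ha1; subst hb1
    by_cases hp : przesuniecie = -2
    · subst hp
      rw [List.filter_eq_self.mpr (by intro c _; simp only [decide_eq_true_eq]; ring)]
      norm_num
    · rw [List.filter_eq_nil_iff.mpr
        (by intro c _; simp only [decide_eq_true_eq]; intro hcontra; apply hp; linarith)]
      simp [hp]
  · have hdpos : 0 < a * b - 1 := by
      rcases lt_or_ge 1 (a * b) with h | h
      · omega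
      · exfalso; apply hd; nlinarith
    set d := a * b - 1 with hdef
    set s := a + b + przesuniecie with hsdef
    have hiff : ∀ c : Int, (a + b + c = a * b * c - przesuniecie) ↔ c * d = s := by
      intro c; constructor <;> intro h <;> nlinarith [h]
    by_cases hmod : PySem.Int.mod s d = 0
    · have hdvd : d ∣ s := (PySem.Int.mod_eq_zero_iff_dvd s d).mp hmod
      set c0 := PySem.Int.floordiv s d with hc0
      have hc0d : c0 * d = s := by
        rw [hc0, PySem.Int.floordiv_eq_ediv_of_pos hdpos]
        exact Int.ediv_mul_cancel hdvd
      have hpred : ∀ c : Int, (a + b + c = a * b * c - przesuniecie) ↔ c = c0 := by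
        intro c
        rw [hiff c, ← hc0d]
        constructor
        · intro h; exact mul_right_cancel₀ (by omega) h
        · intro h; rw [h]
      have hfe : ((PySem.List.pyRange 1 (limit + 1) 1).filter
          (fun c => decide (a + b + c = a * b * c - przesuniecie)))
          = (PySem.List.pyRange 1 (limit + 1) 1).filter (fun c => decide (c = c0)) := by
        apply List.filter_congr
        intro c _
        simp [hpred c]
      rw [hfe, filter_eq_single (PySem.List.nodup_pyRange_one 1 (limit + 1)) c0]
      rw [if_neg hd, if_neg (not_not_intro hmod)]
      by_cases hrange : 1 ≤ c0 ∧ c0 ≤ limit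
      · rw [if_pos ((PySem.List.mem_pyRange_one).mpr (by omega)), if_pos hrange]
        simp [hc0]
      · rw [if_neg (by rw [PySem.List.mem_pyRange_one]; omega), if_neg hrange]
        simp
    · have hndvd : ¬ d ∣ s := fun h => hmod ((PySem.Int.mod_eq_zero_iff_dvd s d).mpr h)
      rw [if_neg hd, if_pos hmod]
      rw [List.filter_eq_nil_iff.mpr ?_]
      · simp
      · intro c _
        simp only [decide_eq_true_eq]
        intro h
        exact hndvd ⟨c, by have := (hiff c).mp h; linarith⟩

-- ===== VERDICT (by name: the statement is the Claim_ definition above) =====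
theorem znajdz_rozwiazania_spec : Claim_equal_znajdz_rozwiazania := by
  intro limit przesuniecie _
  unfold Spec_znajdz_rozwiazania znajdz_rozwiazania_alt
  rw [flatten_A]
  apply List.flatMap_congr
  intro a ha
  apply List.flatMap_congr
  intro b hb
  exact block_eq limit przesuniecie a b
    ((PySem.List.mem_pyRange_one).mp ha).1 ((PySem.List.mem_pyRange_one).mp hb).1
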